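-- pv_equiv track=rewrite | github.com/aroudrasthakur/Cicada-AML | backend/app/services/summary_service.py | _trim_bullets_to_max_words
-- ===== SOURCE A (Python) =====
-- def _trim_to_max_words(text: str, max_words: int = 100) -> str:
--     words = text.split()
--     if len(words) <= max_words:
--         return text
--     cut = " ".join(words[:max_words]).rstrip(".,;:")
--     return cut + "…"
--
-- def _bullet_block(bullets: list[str]) -> str:
--     return "\n".join(f"• {b.strip()}" for b in bullets if b.strip())
--
-- def _word_count(s: str) -> int:
--     return len(s.split())
--
-- def _trim_bullets_to_max_words(bullets: list[str], max_words: int = 100) -> str: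
--     """Drop from the end or shorten until the block is ≤ max_words."""
--     b = [x.strip() for x in bullets if x.strip()]
--     while b and _word_count(_bullet_block(b)) > max_words:
--         if len(b) == 1:
--             b[0] = _trim_to_max_words(b[0], max_words=max(12, max_words - 2))
--             break
--         b.pop()
--     return _bullet_block(b) if b else "• No report metrics available."
-- ===== SOURCE B (Python) =====
-- def _trim_bullets_to_max_words(bullets, max_words=100):
--     b = [x.strip() for x in bullets if x.strip()]
--     if not b:
--         return "• No report metrics available."
--     counts = [1 + len(x.split()) for x in b]
--     total = sum(counts)
--     k = len(b)
--     while k > 1 and total > max_words: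
--         k -= 1
--         total -= counts[k]
--     if total > max_words:
--         w = b[0].split()
--         mw = max(12, max_words - 2)
--         if len(w) <= mw:
--             return "• " + b[0]
--         return "• " + " ".join(w[:mw]).rstrip(".,;:") + "…"
--     return "\n".join("• " + x for x in b[:k])
-- ===== Notes on version B (the rewrite author's own statement) =====
-- stated objective: faster
-- what changed: A re-joins and re-splits the whole bullet block to recount its words on every pop iteration; B computes per-bullet word counts once, keeps a running total while decrementing from the end, and builds the output in a single join.
import Mathlib
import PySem

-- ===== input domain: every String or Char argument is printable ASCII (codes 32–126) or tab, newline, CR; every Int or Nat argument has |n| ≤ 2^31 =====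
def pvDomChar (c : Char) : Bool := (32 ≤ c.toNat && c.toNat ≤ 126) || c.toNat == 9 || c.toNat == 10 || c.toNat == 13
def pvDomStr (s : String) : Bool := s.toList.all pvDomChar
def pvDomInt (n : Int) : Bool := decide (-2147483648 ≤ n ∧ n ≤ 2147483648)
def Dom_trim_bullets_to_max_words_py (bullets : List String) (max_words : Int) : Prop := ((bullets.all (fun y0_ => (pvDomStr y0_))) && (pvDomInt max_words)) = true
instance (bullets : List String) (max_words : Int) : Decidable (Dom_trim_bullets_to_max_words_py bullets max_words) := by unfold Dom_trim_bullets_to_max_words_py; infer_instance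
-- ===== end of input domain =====

-- B replaces A's quadratic pop-and-recount loop (the whole block is re-joined and re-split
-- on every iteration) by per-bullet word counts summed once and a running total that is
-- decremented while popping; objective: faster (asymptotic, O(n·W) → O(W)).

-- string concatenation (Python's `+` / f-string splice), via List Char so it is kernel-transparent
def pvCat (a b : String) : String := String.ofList (a.toList ++ b.toList)

-- hand port of `s.rstrip(".,;:")`: drop trailing characters among ".,;:"; exact for that call
def pvRstripPunct (s : String) : String :=
  String.ofList ((s.toList.reverse.dropWhile (fun ch => ch == '.' || ch == ',' || ch == ';' || ch == ':')).reverse)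

-- ===== PORT A =====
-- port of _trim_to_max_words
def pv_trim_to_max_words (text : String) (max_words : Int) : String :=
  let words := PySem.Str.split₀ text
  if (words.length : Int) ≤ max_words then text
  else pvCat (pvRstripPunct (PySem.Str.join " " (PySem.List.slice words none (some max_words)))) "…"

-- port of _bullet_block
def pv_bullet_block (bullets : List String) : String :=
  PySem.Str.join "\n" ((bullets.filter (fun x => PySem.Str.strip x != "")).map (fun x => pvCat "• " (PySem.Str.strip x)))

-- port of _word_count
def pv_word_count (s : String) : Int := ((PySem.Str.split₀ s).length : Int)

-- the while-loop of A: pop from the end while the block is too long; on a single bullet, shorten it and break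
def pvLoopA (max_words : Int) (b : List String) : List String :=
  if b = [] then b
  else if max_words < pv_word_count (pv_bullet_block b) then
    if b.length = 1 then [pv_trim_to_max_words b.headI (max 12 (max_words - 2))]  -- b[0] is b.headI: b ≠ []
    else pvLoopA max_words b.dropLast
  else b
termination_by b.length
decreasing_by
  rename_i h _ _
  simpa [List.length_dropLast] using Nat.sub_lt (List.length_pos_iff.mpr h) one_pos

def trim_bullets_to_max_words_py (bullets : List String) (max_words : Int) : String :=
  let b := (bullets.map PySem.Str.strip).filter (fun x => x != "")
  let bf := pvLoopA max_words b
  if bf = [] then "• No report metrics available." else pv_bullet_block bf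

-- ===== PORT B =====
-- the while-loop of B: k, total ← k-1, total - counts[k-1] while k > 1 and total > max_words
def pvLoopB (counts : List Int) (max_words : Int) : Nat → Int → Nat × Int
  | 0, total => (0, total)
  | 1, total => (1, total)
  | k+2, total =>
      if max_words < total then pvLoopB counts max_words (k+1) (total - counts.getD (k+1) 0)  -- counts[k+1]: index in range
      else (k+2, total)

def trim_bullets_to_max_words_py_alt (bullets : List String) (max_words : Int) : String :=
  let b := (bullets.map PySem.Str.strip).filter (fun x => x != "")
  if b = [] then "• No report metrics available."
  else
    let counts := b.map (fun x => (1 : Int) + ((PySem.Str.split₀ x).length : Int))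
    let p := pvLoopB counts max_words b.length counts.sum
    if max_words < p.2 then
      let w := PySem.Str.split₀ b.headI   -- b[0]: b ≠ []
      let mw := max 12 (max_words - 2)
      if (w.length : Int) ≤ mw then pvCat "• " b.headI
      else pvCat "• " (pvCat (pvRstripPunct (PySem.Str.join " " (PySem.List.slice w none (some mw)))) "…")
    else PySem.Str.join "\n" ((b.take p.1).map (fun x => pvCat "• " x))

-- ===== PRECONDITION & SPEC =====
def Spec_trim_bullets_to_max_words_py (bullets : List String) (max_words : Int) (out : String) : Prop := out = trim_bullets_to_max_words_py_alt bullets max_words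
instance (bullets : List String) (max_words : Int) (out : String) : Decidable (Spec_trim_bullets_to_max_words_py bullets max_words out) := by unfold Spec_trim_bullets_to_max_words_py; infer_instance

-- ===== CLAIM (what is proved, stated in full; the proofs are below) =====
def Claim_equal_trim_bullets_to_max_words_py : Prop := ∀ (bullets : List String) (max_words : Int), Dom_trim_bullets_to_max_words_py bullets max_words → Spec_trim_bullets_to_max_words_py bullets max_words (trim_bullets_to_max_words_py bullets max_words)

-- ===== LEMMAS AND PROOFS =====

-- `split₀.go` prepends its accumulator (reversed)
theorem pv_go_acc (s cur : List Char) (acc : List (List Char)) :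
    PySem.Chars.split₀.go s cur acc = acc.reverse ++ PySem.Chars.split₀.go s cur [] := by
  induction s generalizing cur acc with
  | nil => simp [PySem.Chars.split₀.go]; split_ifs <;> simp
  | cons c rest ih =>
      simp only [PySem.Chars.split₀.go]
      split_ifs with h1 h2
      · rw [ih [] acc]
      · rw [ih [] (cur.reverse :: acc), ih [] [cur.reverse]]; simp
      · rw [ih (c :: cur) acc]

-- a whitespace character splits `split₀` of a concatenation
theorem pv_split₀_append_space (ch : Char) (h : PySem.Chars.isspace ch = true)
    (a b : List Char) :
    PySem.Chars.split₀ (a ++ ch :: b) = PySem.Chars.split₀ a ++ PySem.Chars.split₀ b := by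
  show PySem.Chars.split₀.go _ [] [] = _
  suffices H : ∀ (a : List Char) (cur : List Char) (acc : List (List Char)),
      PySem.Chars.split₀.go (a ++ ch :: b) cur acc
        = PySem.Chars.split₀.go a cur acc ++ PySem.Chars.split₀.go b [] [] by
    exact H a [] []
  intro a
  induction a with
  | nil =>
      intro cur acc
      simp only [List.nil_append, PySem.Chars.split₀.go, h, if_true]
      split_ifs with hc
      · rw [pv_go_acc b [] acc]
      · rw [pv_go_acc b [] (cur.reverse :: acc)]
  | cons c a' ih =>
      intro cur acc
      simp only [List.cons_append, PySem.Chars.split₀.go]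
      split_ifs with h1 h2 <;> rw [ih]

-- a non-space character followed by a space starts `split₀` with a one-letter word
theorem pv_split₀_word_cons (c d : Char) (hc : PySem.Chars.isspace c = false)
    (hd : PySem.Chars.isspace d = true) (x : List Char) :
    PySem.Chars.split₀ (c :: d :: x) = [c] :: PySem.Chars.split₀ x := by
  show PySem.Chars.split₀.go _ [] [] = _
  simp only [PySem.Chars.split₀.go, hc, hd, if_true, if_false, Bool.false_eq_true,
    List.isEmpty_cons, List.isEmpty_nil]
  rw [pv_go_acc x [] [[c].reverse]]
  simp [PySem.Chars.split₀]

-- every word produced by split₀ is non-empty and contains no whitespace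
theorem pv_split₀_words (s : List Char) :
    ∀ w ∈ PySem.Chars.split₀ s, w ≠ [] ∧ ∀ ch ∈ w, PySem.Chars.isspace ch = false := by
  suffices H : ∀ (s cur : List Char) (acc : List (List Char)),
      (∀ ch ∈ cur, PySem.Chars.isspace ch = false) →
      (∀ w ∈ acc, w ≠ [] ∧ ∀ ch ∈ w, PySem.Chars.isspace ch = false) →
      ∀ w ∈ PySem.Chars.split₀.go s cur acc, w ≠ [] ∧ ∀ ch ∈ w, PySem.Chars.isspace ch = false by
    intro w hw
    exact H s [] [] (by simp) (by simp) w hw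
  intro s
  induction s with
  | nil =>
      intro cur acc hcur hacc w hw
      simp only [PySem.Chars.split₀.go] at hw
      split_ifs at hw with hc
      · exact hacc w (by simpa using hw)
      · simp only [List.mem_reverse, List.mem_cons] at hw
        rcases hw with h | h
        · subst h
          refine ⟨by simpa using hc, ?_⟩
          intro ch hch; exact hcur ch (by simpa using hch)
        · exact hacc w h
  | cons c rest ih =>
      intro cur acc hcur hacc w hw
      simp only [PySem.Chars.split₀.go] at hw
      split_ifs at hw with h1 h2
      · exact ih [] acc (by simp) hacc w hw
      · refine ih [] (cur.reverse :: acc) (by simp) ?_ w hw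
        intro v hv
        rcases List.mem_cons.mp hv with h | h
        · subst h
          refine ⟨by simpa using h2, ?_⟩
          intro ch hch; exact hcur ch (by simpa using hch)
        · exact hacc v h
      · refine ih (c :: cur) acc ?_ hacc w hw
        intro ch hch
        rcases List.mem_cons.mp hch with h | h
        · subst h; simpa using h1
        · exact hcur ch h

-- lstrip leaves a list whose head (if any) is non-space
theorem pv_lstrip_head (s : List Char) (c : Char) (cs : List Char)
    (h : PySem.Chars.lstrip s = c :: cs) : PySem.Chars.isspace c = false := by
  unfold PySem.Chars.lstrip at h
  have := List.head?_dropWhile_not PySem.Chars.isspace s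
  rw [h] at this
  simpa using this

-- lstrip of a list starting with a non-space character is the list itself
theorem pv_lstrip_of_head (c : Char) (cs : List Char) (h : PySem.Chars.isspace c = false) :
    PySem.Chars.lstrip (c :: cs) = c :: cs := by
  unfold PySem.Chars.lstrip
  rw [List.dropWhile_cons_of_neg (by simp [h])]

-- rstrip keeps a prefix
theorem pv_rstrip_prefix (s : List Char) : PySem.Chars.rstrip s <+: s := by
  unfold PySem.Chars.rstrip
  have := List.dropWhile_suffix (l := s.reverse) PySem.Chars.isspace
  simpa using this.reverse

theorem pv_dropWhile_idem (p : Char → Bool) (l : List Char) :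
    List.dropWhile p (List.dropWhile p l) = List.dropWhile p l := by
  rcases h : List.dropWhile p l with _ | ⟨c, cs⟩
  · rfl
  · have := List.head?_dropWhile_not p l
    rw [h] at this
    exact List.dropWhile_cons_of_neg (by simpa using this)

-- strip is idempotent
theorem pv_strip_strip (s : List Char) :
    PySem.Chars.strip (PySem.Chars.strip s) = PySem.Chars.strip s := by
  unfold PySem.Chars.strip
  have h1 : PySem.Chars.lstrip (PySem.Chars.rstrip (PySem.Chars.lstrip s))
      = PySem.Chars.rstrip (PySem.Chars.lstrip s) := by
    rcases hr : PySem.Chars.rstrip (PySem.Chars.lstrip s) with _ | ⟨c, cs⟩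
    · simp [PySem.Chars.lstrip]
    · have hpre := pv_rstrip_prefix (PySem.Chars.lstrip s)
      rw [hr] at hpre
      rcases hpre with ⟨t, ht⟩
      exact pv_lstrip_of_head c cs (pv_lstrip_head s c (cs ++ t) (by rw [← ht]; simp))
  rw [h1]
  unfold PySem.Chars.rstrip
  rw [List.reverse_reverse, pv_dropWhile_idem]

-- strip at the String level is idempotent
theorem pv_str_strip_strip (x : String) :
    PySem.Str.strip (PySem.Str.strip x) = PySem.Str.strip x := by
  unfold PySem.Str.strip
  rw [String.toList_ofList, pv_strip_strip]

-- every element of A's/B's initial list is stripped and non-empty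
theorem pv_b_prop (bullets : List String) :
    ∀ x ∈ (bullets.map PySem.Str.strip).filter (fun x => x != ""),
      PySem.Str.strip x = x ∧ x ≠ "" := by
  intro x hx
  rw [List.mem_filter, List.mem_map] at hx
  obtain ⟨⟨y, _, hy⟩, hne⟩ := hx
  exact ⟨by rw [← hy, pv_str_strip_strip], by simpa using hne⟩

-- on a list of stripped non-empty strings the bullet block is a plain join
theorem pv_block_eq (l : List String) (hP : ∀ x ∈ l, PySem.Str.strip x = x ∧ x ≠ "") :
    pv_bullet_block l = PySem.Str.join "\n" (l.map (fun x => pvCat "• " x)) := by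
  have hf : l.filter (fun x => PySem.Str.strip x != "") = l := by
    rw [List.filter_eq_self]
    intro x hx
    rw [(hP x hx).1]
    simpa using (hP x hx).2
  have hm : (l.filter (fun x => PySem.Str.strip x != "")).map (fun x => pvCat "• " (PySem.Str.strip x))
      = l.map (fun x => pvCat "• " x) := by
    rw [hf]
    apply List.map_congr_left
    intro x hx
    rw [(hP x hx).1]
  exact congrArg (PySem.Str.join "\n") hm

-- Chars-level word count of the joined block
theorem pv_wc_chars (l : List (List Char)) :
    (PySem.Chars.split₀ (PySem.Chars.join ['\n'] (l.map (fun x => '•' :: ' ' :: x)))).length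
      = (l.map (fun x => 1 + (PySem.Chars.split₀ x).length)).sum := by
  induction l with
  | nil => rfl
  | cons x rest ih =>
      cases rest with
      | nil =>
          simp only [List.map_cons, List.map_nil]
          have hj : PySem.Chars.join ['\n'] [('•' :: ' ' :: x)] = '•' :: ' ' :: x := by
            simp [PySem.Chars.join, List.intercalate]
          rw [hj, pv_split₀_word_cons '•' ' ' (by decide) (by decide)]
          simp [Nat.add_comm]
      | cons y r =>
          have hj : PySem.Chars.join ['\n'] (((x :: y :: r).map (fun x => '•' :: ' ' :: x)))
              = ('•' :: ' ' :: x) ++ '\n' :: PySem.Chars.join ['\n'] ((y :: r).map (fun x => '•' :: ' ' :: x)) := by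
            simp [PySem.Chars.join, List.intercalate]
          rw [hj, pv_split₀_append_space '\n' (by decide),
            pv_split₀_word_cons '•' ' ' (by decide) (by decide) x]
          simp only [List.length_append, List.length_cons, List.map_cons, List.sum_cons] at ih ⊢
          omega

-- cast of the per-bullet counts from Nat to Int
theorem pv_sum_cast (l : List String) :
    ((((l.map String.toList).map (fun x => 1 + (PySem.Chars.split₀ x).length)).sum : Nat) : Int)
      = (l.map (fun x => (1 : Int) + ((PySem.Str.split₀ x).length : Int))).sum := by
  induction l with
  | nil => rfl
  | cons x r ih =>
      have h0 : (PySem.Str.split₀ x).length = (PySem.Chars.split₀ x.toList).length := by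
        unfold PySem.Str.split₀; simp
      simp only [List.map_cons, List.sum_cons]
      push_cast at ih ⊢
      rw [ih, h0]

-- word count of the joined block, at the String level
theorem pv_wc_block (l : List String) :
    pv_word_count (PySem.Str.join "\n" (l.map (fun x => pvCat "• " x)))
      = (l.map (fun x => (1 : Int) + ((PySem.Str.split₀ x).length : Int))).sum := by
  unfold pv_word_count
  have h0 : ∀ (s : String), (PySem.Str.split₀ s).length = (PySem.Chars.split₀ s.toList).length := by
    intro s; unfold PySem.Str.split₀; simp
  rw [h0]
  have h1 : (PySem.Str.join "\n" (l.map (fun x => pvCat "• " x))).toList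
      = PySem.Chars.join ['\n'] ((l.map String.toList).map (fun x => '•' :: ' ' :: x)) := by
    unfold PySem.Str.join
    rw [String.toList_ofList]
    congr 1
    rw [List.map_map, List.map_map]
    apply List.map_congr_left
    intro x _
    simp only [Function.comp_apply, pvCat, String.toList_ofList]
    rfl
  rw [h1, pv_wc_chars]
  exact pv_sum_cast l

-- rstrip fixes a list ending in a non-space character
theorem pv_rstrip_last (l : List Char) (c : Char) (h : PySem.Chars.isspace c = false) :
    PySem.Chars.rstrip (l ++ [c]) = l ++ [c] := by
  unfold PySem.Chars.rstrip
  rw [List.reverse_append, List.reverse_singleton, List.singleton_append,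
    List.dropWhile_cons_of_neg (by simp [h]), List.reverse_cons, List.reverse_reverse]

-- a right-strip (of any character set) keeps a prefix
theorem pv_dropWhile_rev_prefix (p : Char → Bool) (l : List Char) :
    (l.reverse.dropWhile p).reverse <+: l := by
  have := List.dropWhile_suffix (l := l.reverse) p
  simpa using this.reverse

-- Chars.join starts with its first part
theorem pv_join_head (sep : List Char) (a : List Char) (as : List (List Char)) :
    ∃ r, PySem.Chars.join sep (a :: as) = a ++ r := by
  cases as with
  | nil => exact ⟨[], by simp [PySem.Chars.join, List.intercalate]⟩
  | cons b bs =>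
      refine ⟨sep ++ PySem.Chars.join sep (b :: bs), ?_⟩
      simp [PySem.Chars.join, List.intercalate]

-- Str.join of a single string is that string
theorem pv_join_singleton (sep : String) (y : String) : PySem.Str.join sep [y] = y := by
  unfold PySem.Str.join
  rw [show ([y].map String.toList) = [y.toList] from rfl]
  rw [show PySem.Chars.join sep.toList [y.toList] = y.toList from by simp [PySem.Chars.join, List.intercalate]]
  exact String.ofList_toList

-- a String is non-empty iff its character list is
theorem pv_ne_empty_of_toList (s : String) (h : s.toList ≠ []) : s ≠ "" := by
  intro he; subst he; exact h rfl

-- the output of _trim_to_max_words on a stripped non-empty string is stripped and non-empty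
theorem pv_trim_prop (x : String) (m : Int) (hx : PySem.Str.strip x = x) (hne : x ≠ "")
    (hm : 1 ≤ m) :
    PySem.Str.strip (pv_trim_to_max_words x m) = pv_trim_to_max_words x m ∧
      pv_trim_to_max_words x m ≠ "" := by
  simp only [pv_trim_to_max_words]
  split_ifs with h
  · exact ⟨hx, hne⟩
  · -- the cut-and-ellipsis branch
    rw [PySem.List.slice_to _ (by omega)]
    have hlen : m.toNat < (PySem.Str.split₀ x).length := by omega
    obtain ⟨w0, ws, hw⟩ : ∃ w0 ws, PySem.Str.split₀ x = w0 :: ws := by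
      cases hsw : PySem.Str.split₀ x with
      | nil => rw [hsw] at hlen; simp at hlen
      | cons a l => exact ⟨a, l, rfl⟩
    have htake : (PySem.Str.split₀ x).take m.toNat = w0 :: ws.take (m.toNat - 1) := by
      rw [hw]
      cases hmt : m.toNat with
      | zero => omega
      | succ n => simp
    rw [htake]
    -- w0 is a word of split₀ x: non-empty, no whitespace
    have hw0 : w0.toList ≠ [] ∧ ∀ ch ∈ w0.toList, PySem.Chars.isspace ch = false := by
      have hmem : w0.toList ∈ PySem.Chars.split₀ x.toList := by
        have : w0 ∈ PySem.Str.split₀ x := by rw [hw]; exact List.mem_cons_self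
        unfold PySem.Str.split₀ at this
        rw [List.mem_map] at this
        obtain ⟨w, hwmem, hweq⟩ := this
        rwa [← hweq, String.toList_ofList]
      exact pv_split₀_words x.toList w0.toList hmem
    -- the joined string starts with w0
    obtain ⟨r, hr⟩ := pv_join_head [' '] w0.toList ((ws.take (m.toNat - 1)).map String.toList)
    set J := PySem.Str.join " " (w0 :: ws.take (m.toNat - 1)) with hJ
    have hJL : J.toList = w0.toList ++ r := by
      rw [hJ]; unfold PySem.Str.join; rw [String.toList_ofList]
      rw [show ((w0 :: ws.take (m.toNat - 1)).map String.toList)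
          = w0.toList :: ((ws.take (m.toNat - 1)).map String.toList) from rfl]
      rw [show (" ".toList : List Char) = [' '] from rfl]
      exact hr
    set C := pvRstripPunct J with hC
    have hCpre : C.toList <+: J.toList := by
      rw [hC]; unfold pvRstripPunct; rw [String.toList_ofList]
      exact pv_dropWhile_rev_prefix _ _
    have hT : (pvCat C "…").toList = C.toList ++ ['…'] := by
      unfold pvCat; rw [String.toList_ofList]; rfl
    constructor
    · -- stripped
      have hstrip : PySem.Chars.strip (C.toList ++ ['…']) = C.toList ++ ['…'] := by
        unfold PySem.Chars.strip
        have hl : PySem.Chars.lstrip (C.toList ++ ['…']) = C.toList ++ ['…'] := by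
          cases hCL : C.toList with
          | nil => simpa [hCL] using pv_lstrip_of_head '…' [] (by decide)
          | cons c cs =>
              have hcj : c ∈ w0.toList := by
                rcases hCpre with ⟨t, ht⟩
                rw [hCL, hJL] at ht
                cases hw0L : w0.toList with
                | nil => exact absurd hw0L hw0.1
                | cons d ds =>
                    rw [hw0L] at ht
                    have ht' : c :: (cs ++ t) = d :: (ds ++ r) := by simpa using ht
                    obtain ⟨h1, -⟩ := List.cons.inj ht'
                    simp [h1]
              exact pv_lstrip_of_head c (cs ++ ['…']) (hw0.2 c hcj)
        rw [hl]
        exact pv_rstrip_last _ '…' (by decide)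
      unfold PySem.Str.strip
      rw [hT, hstrip, ← hT, String.ofList_toList]
    · apply pv_ne_empty_of_toList
      rw [hT]
      simp

-- the first component of B's loop stays between 1 and its start value
theorem pv_loopB_fst (counts : List Int) (mw : Int) :
    ∀ (k : Nat) (total : Int), 1 ≤ k →
      1 ≤ (pvLoopB counts mw k total).1 ∧ (pvLoopB counts mw k total).1 ≤ k := by
  intro k
  induction k using Nat.strong_induction_on with
  | _ k ih =>
    intro total hk
    rcases k with _ | _ | n
    · omega
    · simp [pvLoopB]
    · rw [pvLoopB]
      split_ifs with h
      · have := ih (n+1) (by omega) (total - counts.getD (n+1) 0) (by omega)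
        exact ⟨this.1, by omega⟩
      · simp

-- peeling one element off the sum of a prefix
theorem pv_sum_take_succ (l : List Int) (n : Nat) (h : n < l.length) :
    (l.take (n+1)).sum = (l.take n).sum + l.getD n 0 := by
  rw [List.take_succ, List.sum_append]
  congr 1
  rw [List.getElem?_eq_getElem h]
  simp [List.getD, List.getElem?_eq_getElem h]

-- A's pop loop on a prefix of b computes exactly what B's counting loop computes
theorem pv_loop_main (mw : Int) (b : List String) (counts : List Int)
    (hP : ∀ x ∈ b, PySem.Str.strip x = x ∧ x ≠ "")
    (hc : counts = b.map (fun x => (1 : Int) + ((PySem.Str.split₀ x).length : Int))) :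
    ∀ (k : Nat), 1 ≤ k → k ≤ b.length →
      pvLoopA mw (b.take k)
        = (if mw < (pvLoopB counts mw k ((counts.take k).sum)).2
           then [pv_trim_to_max_words b.headI (max 12 (mw - 2))]
           else b.take (pvLoopB counts mw k ((counts.take k).sum)).1) := by
  have hwc : ∀ (j : Nat), pv_word_count (pv_bullet_block (b.take j)) = (counts.take j).sum := by
    intro j
    rw [pv_block_eq (b.take j) (fun x hx => hP x (List.mem_of_mem_take hx)), pv_wc_block,
      hc, List.map_take]
  intro k
  induction k with
  | zero => omega
  | succ n ih =>
      intro _ hk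
      rcases n with _ | n'
      · -- k = 1
        have ht1 : b.take 1 = [b.headI] := by
          cases b with
          | nil => simp at hk
          | cons a l => rfl
        have hw1 := hwc 1
        rw [ht1] at hw1 ⊢
        have hB1 : pvLoopB counts mw 1 ((counts.take 1).sum) = (1, (counts.take 1).sum) := rfl
        rw [pvLoopA, if_neg (by simp : ¬(([b.headI] : List String) = [])), hw1, hB1,
          if_pos (by simp : ([b.headI] : List String).length = 1)]
        split_ifs with h1
        · simp
        · rw [ht1]
      · -- k = n' + 2
        have hnn : n' + 1 + 1 = n' + 2 := by omega
        rw [hnn] at hk ⊢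
        have hk' : n' + 1 ≤ b.length := by omega
        have hclen : counts.length = b.length := by rw [hc]; simp
        have hlen2 : (b.take (n'+2)).length = n'+2 := by
          simp only [List.length_take]
          omega
        have hdrop : (b.take (n'+2)).dropLast = b.take (n'+1) := by
          rw [List.dropLast_eq_take, hlen2, List.take_take]
          congr 1
          omega
        have hne2 : b.take (n'+2) ≠ [] := by
          intro hcontra
          rw [hcontra] at hlen2
          simp at hlen2
        have hsum : (counts.take (n'+2)).sum - counts.getD (n'+1) 0 = (counts.take (n'+1)).sum := by
          have h := pv_sum_take_succ counts (n'+1) (by omega)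
          rw [hnn] at h
          omega
        have hB2 : pvLoopB counts mw (n'+2) ((counts.take (n'+2)).sum)
            = if mw < (counts.take (n'+2)).sum
              then pvLoopB counts mw (n'+1) ((counts.take (n'+2)).sum - counts.getD (n'+1) 0)
              else (n'+2, (counts.take (n'+2)).sum) := rfl
        rw [pvLoopA, if_neg hne2]
        rw [hwc (n'+2), hlen2, hB2, if_neg (show ¬(n' + 2 = 1) from by omega)]
        by_cases h1 : mw < (counts.take (n'+2)).sum
        · -- still too long: pop and recurse
          rw [if_pos h1, if_pos h1, hdrop, hsum]
          exact ih (by omega) hk'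
        · rw [if_neg h1, if_neg h1,
            if_neg (show ¬ mw < ((n'+2 : Nat), (counts.take (n'+2)).sum).2 from h1)]

-- the head of a non-empty list is a member
theorem pv_headI_mem (l : List String) (h : l ≠ []) : l.headI ∈ l := by
  cases l with
  | nil => exact absurd rfl h
  | cons a t => exact List.mem_cons_self

theorem trim_bullets_to_max_words_py_spec : Claim_equal_trim_bullets_to_max_words_py := by
  intro bullets mw _
  unfold Spec_trim_bullets_to_max_words_py
  simp only [trim_bullets_to_max_words_py, trim_bullets_to_max_words_py_alt]
  set b := (bullets.map PySem.Str.strip).filter (fun x => x != "") with hb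
  have hP : ∀ x ∈ b, PySem.Str.strip x = x ∧ x ≠ "" := pv_b_prop bullets
  by_cases hbe : b = []
  · have hA : pvLoopA mw b = [] := by rw [hbe, pvLoopA]; simp
    rw [hA, if_pos rfl, if_pos hbe]
  · have hlen : 1 ≤ b.length := by
      have := List.length_pos_iff.mpr hbe
      omega
    set counts := b.map (fun x => (1 : Int) + ((PySem.Str.split₀ x).length : Int)) with hcdef
    have hclen : counts.length = b.length := by rw [hcdef]; simp
    have htl : b.take b.length = b := List.take_length
    have hts : counts.take b.length = counts := by rw [← hclen]; exact List.take_length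
    have hmain := pv_loop_main mw b counts hP hcdef b.length hlen le_rfl
    rw [htl, hts] at hmain
    rw [if_neg hbe, hmain]
    by_cases h2 : mw < (pvLoopB counts mw b.length counts.sum).2
    · rw [if_pos h2]
      set t := pv_trim_to_max_words b.headI (max 12 (mw - 2)) with htdef
      have hPb0 := hP b.headI (pv_headI_mem b hbe)
      have hPt := pv_trim_prop b.headI (max 12 (mw - 2)) hPb0.1 hPb0.2
        (le_trans (by norm_num) (le_max_left 12 (mw - 2)))
      rw [if_neg (by simp : ¬(([t] : List String) = [])),
        pv_block_eq [t] (by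
          intro x hx
          rw [List.mem_singleton] at hx
          subst hx
          exact hPt)]
      rw [show ([t].map (fun x => pvCat "• " x)) = [pvCat "• " t] from rfl, pv_join_singleton]
      rw [htdef]
      simp only [pv_trim_to_max_words]
      split_ifs <;> rfl
    · rw [if_neg h2]
      have hfst := pv_loopB_fst counts mw b.length counts.sum hlen
      have hne' : b.take (pvLoopB counts mw b.length counts.sum).1 ≠ [] := by
        apply List.ne_nil_of_length_pos
        rw [List.length_take]
        omega
      rw [if_neg hne', pv_block_eq _ (fun x hx => hP x (List.mem_of_mem_take hx)), if_neg h2]
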